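-- pv_equiv track=rewrite | github.com/ahmadsharabati/QAPAL | backend/services/narration.py | _build_narration_prompt
-- ===== SOURCE A (Python) =====
-- def _build_narration_prompt(
--     url: str,
--     score: int,
--     issues: list,
--     pages_crawled: int,
--     actions_taken: int,
--     timed_out: bool = False,
-- ) -> str:
--     """Build the prompt for AI narration."""
--
--     # Group issues by severity
--     by_severity: dict[str, list] = {"critical": [], "high": [], "medium": [], "low": []}
--     for issue in issues[:20]:  # cap to keep prompt small
--         sev = issue.get("severity", "medium")
--         by_severity.setdefault(sev, []).append(issue.get("message", "Unknown issue"))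
--
--     issue_summary = []
--     for sev in ("critical", "high", "medium", "low"):
--         items = by_severity.get(sev, [])
--         if items:
--             issue_summary.append(f"  {sev.upper()} ({len(items)}):")
--             for msg in items[:5]:
--                 issue_summary.append(f"    - {msg[:150]}")
--             if len(items) > 5:
--                 issue_summary.append(f"    ... and {len(items) - 5} more")
--
--     issues_text = "\n".join(issue_summary) if issue_summary else "  No issues found."
--
--     timeout_note = " (scan timed out, results are partial)" if timed_out else ""
--
--     return f"""You are a QA analyst summarizing automated test results for a website owner.
--
-- SCAN RESULTS for {url}{timeout_note}:
--   Score: {score}/100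
--   Pages crawled: {pages_crawled}
--   Test actions executed: {actions_taken}
--
-- ISSUES FOUND:
-- {issues_text}
--
-- Write a 2-3 sentence summary for a non-technical audience. Be specific about what works
-- and what needs attention. If the score is high (80+), lead with the positive. If low,
-- lead with the most critical problems. Don't mention the score number directly.
-- Keep it under 60 words. No markdown, no bullet points — plain sentences only."""
-- ===== SOURCE B (Python) =====
-- def _severity_lines(sev, msgs):
--     if not msgs:
--         return []
--     lines = [f"  {sev.upper()} ({len(msgs)}):"] + [f"    - {m[:150]}" for m in msgs[:5]]
--     if len(msgs) > 5:
--         lines.append(f"    ... and {len(msgs) - 5} more")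
--     return lines
--
--
-- def _build_narration_prompt(
--     url: str,
--     score: int,
--     issues: list,
--     pages_crawled: int,
--     actions_taken: int,
--     timed_out: bool = False,
-- ) -> str:
--     """Build the prompt for AI narration (no intermediate grouping table)."""
--     capped = issues[:20]
--     summary = [line
--                for sev in ("critical", "high", "medium", "low")
--                for line in _severity_lines(sev, [i.get("message", "Unknown issue")
--                                                  for i in capped
--                                                  if i.get("severity", "medium") == sev])]
--     issues_text = "\n".join(summary) if summary else "  No issues found."
--     timeout_note = " (scan timed out, results are partial)" if timed_out else ""
--
--     return f"""You are a QA analyst summarizing automated test results for a website owner.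
--
-- SCAN RESULTS for {url}{timeout_note}:
--   Score: {score}/100
--   Pages crawled: {pages_crawled}
--   Test actions executed: {actions_taken}
--
-- ISSUES FOUND:
-- {issues_text}
--
-- Write a 2-3 sentence summary for a non-technical audience. Be specific about what works
-- and what needs attention. If the score is high (80+), lead with the positive. If low,
-- lead with the most critical problems. Don't mention the score number directly.
-- Keep it under 60 words. No markdown, no bullet points — plain sentences only."""
-- ===== Notes on version B (the rewrite author's own statement) =====
-- stated objective: simpler
-- what changed: Drops A's mutable severity->messages grouping dict entirely: B loops over the four severities in fixed order and selects each one's messages directly from issues[:20] with a filter, emitting each block via a small helper.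
import Mathlib
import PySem

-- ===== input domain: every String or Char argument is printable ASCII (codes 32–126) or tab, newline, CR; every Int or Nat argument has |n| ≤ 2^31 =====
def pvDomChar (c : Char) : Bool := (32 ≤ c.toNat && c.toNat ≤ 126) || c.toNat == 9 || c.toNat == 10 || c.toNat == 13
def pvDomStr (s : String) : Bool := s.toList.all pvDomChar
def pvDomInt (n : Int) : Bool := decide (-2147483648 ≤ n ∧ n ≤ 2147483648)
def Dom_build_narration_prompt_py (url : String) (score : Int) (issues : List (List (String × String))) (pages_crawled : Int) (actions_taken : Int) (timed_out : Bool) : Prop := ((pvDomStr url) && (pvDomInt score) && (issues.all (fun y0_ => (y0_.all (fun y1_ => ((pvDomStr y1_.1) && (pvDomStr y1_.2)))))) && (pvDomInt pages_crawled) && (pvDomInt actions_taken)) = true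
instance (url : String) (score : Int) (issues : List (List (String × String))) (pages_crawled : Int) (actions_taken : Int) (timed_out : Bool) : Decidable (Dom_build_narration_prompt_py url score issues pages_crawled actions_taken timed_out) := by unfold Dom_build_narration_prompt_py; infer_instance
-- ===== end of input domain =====

-- B replaces A's mutable severity->messages grouping dict with a direct per-severity
-- filter over issues[:20]; objective: simpler (no intermediate table). Same return value.

-- ===== PORT A =====
-- issue.get(k, dflt) on a Python dict, ported as first-match lookup on the assoc list
def pvAIssueGet (issue : List (String × String)) (k dflt : String) : String :=
  (PySem.Dict.mk issue).getD k dflt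

-- loop body: by_severity.setdefault(sev, []).append(issue.get("message", "Unknown issue"))
def pvAGroupStep (d : PySem.Dict String (List String)) (issue : List (String × String)) : PySem.Dict String (List String) :=
  let sev := pvAIssueGet issue "severity" "medium"
  (d.setdefault sev []).modify sev [] (fun ms => ms ++ [pvAIssueGet issue "message" "Unknown issue"])

-- body of A's summary loop for one severity: extend acc with the block if items is nonempty
def pvASummaryStep (by_severity : PySem.Dict String (List String)) (acc : List String) (sev : String) : List String :=
  let items := by_severity.getD sev []
  if items ≠ [] then
    acc ++ ["  " ++ PySem.Str.upper sev ++ " (" ++ PySem.Int.toStr items.length ++ "):"]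
        ++ (PySem.List.slice items none (some 5)).map
             (fun msg => "    - " ++ PySem.Str.slice msg none (some 150))
        ++ (if items.length > 5 then
              ["    ... and " ++ PySem.Int.toStr ((items.length : Int) - 5) ++ " more"]
            else [])
  else acc

def build_narration_prompt_py (url : String) (score : Int) (issues : List (List (String × String))) (pages_crawled : Int) (actions_taken : Int) (timed_out : Bool) : String :=
  -- by_severity = {"critical": [], "high": [], "medium": [], "low": []}; then the grouping loop
  let init : PySem.Dict String (List String) :=
    ((((PySem.Dict.empty.insert "critical" []).insert "high" []).insert "medium" []).insert "low" [])
  let by_severity := (PySem.List.slice issues none (some 20)).foldl pvAGroupStep init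
  let issue_summary := ["critical", "high", "medium", "low"].foldl (pvASummaryStep by_severity) []
  let issues_text := if issue_summary ≠ [] then PySem.Str.join "\n" issue_summary else "  No issues found."
  let timeout_note := if timed_out then " (scan timed out, results are partial)" else ""
  "You are a QA analyst summarizing automated test results for a website owner.\n\nSCAN RESULTS for "
    ++ url ++ timeout_note ++ ":\n  Score: " ++ PySem.Int.toStr score ++ "/100\n  Pages crawled: "
    ++ PySem.Int.toStr pages_crawled ++ "\n  Test actions executed: " ++ PySem.Int.toStr actions_taken
    ++ "\n\nISSUES FOUND:\n" ++ issues_text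
    ++ "\n\nWrite a 2-3 sentence summary for a non-technical audience. Be specific about what works\nand what needs attention. If the score is high (80+), lead with the positive. If low,\nlead with the most critical problems. Don't mention the score number directly.\nKeep it under 60 words. No markdown, no bullet points — plain sentences only."

-- ===== PORT B =====
-- _severity_lines(sev, msgs) from Source B
def pvBSeverityLines (sev : String) (msgs : List String) : List String :=
  if msgs.isEmpty then []
  else
    (["  " ++ PySem.Str.upper sev ++ " (" ++ PySem.Int.toStr msgs.length ++ "):"]
      ++ (PySem.List.slice msgs none (some 5)).map
           (fun m => "    - " ++ PySem.Str.slice m none (some 150)))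
    ++ (if msgs.length > 5 then
          ["    ... and " ++ PySem.Int.toStr ((msgs.length : Int) - 5) ++ " more"]
        else [])

def build_narration_prompt_py_alt (url : String) (score : Int) (issues : List (List (String × String))) (pages_crawled : Int) (actions_taken : Int) (timed_out : Bool) : String :=
  let capped := PySem.List.slice issues none (some 20)
  let summary :=
    ["critical", "high", "medium", "low"].flatMap
      (fun sev =>
        pvBSeverityLines sev
          ((capped.filter
              (fun i => (PySem.Dict.mk i).getD "severity" "medium" == sev)).map
            (fun i => (PySem.Dict.mk i).getD "message" "Unknown issue")))
  let issues_text := if summary ≠ [] then PySem.Str.join "\n" summary else "  No issues found."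
  let timeout_note := if timed_out then " (scan timed out, results are partial)" else ""
  "You are a QA analyst summarizing automated test results for a website owner.\n\nSCAN RESULTS for "
    ++ url ++ timeout_note ++ ":\n  Score: " ++ PySem.Int.toStr score ++ "/100\n  Pages crawled: "
    ++ PySem.Int.toStr pages_crawled ++ "\n  Test actions executed: " ++ PySem.Int.toStr actions_taken
    ++ "\n\nISSUES FOUND:\n" ++ issues_text
    ++ "\n\nWrite a 2-3 sentence summary for a non-technical audience. Be specific about what works\nand what needs attention. If the score is high (80+), lead with the positive. If low,\nlead with the most critical problems. Don't mention the score number directly.\nKeep it under 60 words. No markdown, no bullet points — plain sentences only."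

-- ===== PRECONDITION & SPEC =====
def Spec_build_narration_prompt_py (url : String) (score : Int) (issues : List (List (String × String))) (pages_crawled : Int) (actions_taken : Int) (timed_out : Bool) (out : String) : Prop := out = build_narration_prompt_py_alt url score issues pages_crawled actions_taken timed_out
instance (url : String) (score : Int) (issues : List (List (String × String))) (pages_crawled : Int) (actions_taken : Int) (timed_out : Bool) (out : String) : Decidable (Spec_build_narration_prompt_py url score issues pages_crawled actions_taken timed_out out) := by unfold Spec_build_narration_prompt_py; infer_instance

-- ===== CLAIM (what is proved, stated in full; the proofs are below) =====
def Claim_equal_build_narration_prompt_py : Prop := ∀ (url : String) (score : Int) (issues : List (List (String × String))) (pages_crawled : Int) (actions_taken : Int) (timed_out : Bool), Dom_build_narration_prompt_py url score issues pages_crawled actions_taken timed_out → Spec_build_narration_prompt_py url score issues pages_crawled actions_taken timed_out (build_narration_prompt_py url score issues pages_crawled actions_taken timed_out)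

-- ===== LEMMAS AND PROOFS =====

-- one grouping step: setdefault-then-append touches exactly the key sev
lemma pv_step_getD (d : PySem.Dict String (List String)) (k s m : String) :
    ((d.setdefault k []).modify k [] (fun ms => ms ++ [m])).getD s []
      = if s = k then d.getD s [] ++ [m] else d.getD s [] := by
  by_cases hc : d.contains k = true
  · rw [PySem.Dict.setdefault_of_contains d [] hc, PySem.Dict.getD_modify]
    split_ifs with h
    · subst h; rfl
    · rfl
  · have hc' : d.contains k = false := by simpa using hc
    rw [PySem.Dict.setdefault_of_not_contains d [] hc', PySem.Dict.getD_modify]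
    simp only [PySem.Dict.getD_insert]
    split_ifs with h
    · subst h; rw [PySem.Dict.getD_of_not_contains d [] hc']
    · rfl

-- the grouping fold reads back exactly the filtered messages, per key
lemma pv_grouped_getD (l : List (List (String × String))) (d : PySem.Dict String (List String)) (s : String) :
    (l.foldl pvAGroupStep d).getD s []
    = d.getD s []
      ++ (l.filter (fun i => (PySem.Dict.mk i).getD "severity" "medium" == s)).map
           (fun i => (PySem.Dict.mk i).getD "message" "Unknown issue") := by
  induction l generalizing d with
  | nil => simp
  | cons i t ih =>
      rw [List.foldl_cons, ih, List.filter_cons]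
      simp only [pvAGroupStep, pvAIssueGet, pv_step_getD]
      by_cases h : (PySem.Dict.mk i).getD "severity" "medium" = s
      · simp [h]
      · have h' : ¬ s = (PySem.Dict.mk i).getD "severity" "medium" := fun hs => h hs.symm
        simp [h, h']

-- the literal initial dict is empty at each of the four keys
lemma pv_init_getD (s : String) :
    (((((PySem.Dict.empty.insert "critical" ([] : List String)).insert "high" []).insert "medium" []).insert "low" []).getD s [])
      = [] := by
  simp only [PySem.Dict.getD_insert, PySem.Dict.getD_empty]
  split_ifs <;> rfl

-- one A-summary step is B's block helper appended to the accumulator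
lemma pv_block (d : PySem.Dict String (List String)) (acc : List String) (sev : String) :
    pvASummaryStep d acc sev = acc ++ pvBSeverityLines sev (d.getD sev []) := by
  unfold pvASummaryStep pvBSeverityLines
  by_cases h : d.getD sev [] = [] <;>
    simp [h, List.isEmpty_iff, List.append_assoc]

-- A's summary fold is B's flatMap of blocks
lemma pv_summary (sevs : List String) (d : PySem.Dict String (List String)) (acc : List String) :
    sevs.foldl (pvASummaryStep d) acc
      = acc ++ sevs.flatMap (fun sev => pvBSeverityLines sev (d.getD sev [])) := by
  induction sevs generalizing acc with
  | nil => simp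
  | cons s t ih =>
      rw [List.foldl_cons, pv_block, ih, List.flatMap_cons, List.append_assoc]

-- ===== VERDICT (by name: the statement is the Claim_ definition above) =====
theorem build_narration_prompt_py_spec : Claim_equal_build_narration_prompt_py := by
  intro url score issues pages_crawled actions_taken timed_out _
  unfold Spec_build_narration_prompt_py build_narration_prompt_py build_narration_prompt_py_alt
  simp only [pv_summary, pv_grouped_getD, pv_init_getD, List.nil_append]
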